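-- pv_equiv track=rewrite | github.com/oushihsabiy/pdftojson | src/book/mdTotex.py | _split_by_text_macro
-- ===== SOURCE A (Python) =====
-- from typing import Any, Dict, List, Optional, Tuple
--
-- def _split_by_text_macro(inner: str, macro: str = r"\text{") -> List[Tuple[str, str]]:
--     """
--     Split a math-mode string by occurrences of \text{...} while respecting (basic) brace nesting.
--
--     Returns a list of ("math"|"text", segment). The sequence always starts with "math".
--     """
--     s = inner or ""
--     out: List[Tuple[str, str]] = []
--     i = 0
--     L = len(macro)
--
--     while True:
--         j = s.find(macro, i)
--         if j == -1:
--             out.append(("math", s[i:]))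
--             break
--
--         out.append(("math", s[i:j]))
--
--         k = j + L
--         depth = 1
--         while k < len(s) and depth > 0:
--             ch = s[k]
--             prev = s[k - 1] if k > 0 else ""
--             if ch == "{" and prev != "\\":
--                 depth += 1
--             elif ch == "}" and prev != "\\":
--                 depth -= 1
--             k += 1
--
--         content = s[j + L : k - 1] if depth == 0 else s[j + L :]
--         out.append(("text", content))
--         i = k
--
--     return out
-- ===== SOURCE B (Python) =====
-- from typing import List, Optional, Tuple
--
-- def _split_by_text_macro(inner: str, macro: str = r"\text{") -> List[Tuple[str, str]]:
--     """Staged re-implementation: (1) list every macro occurrence, (2) prefix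
--     brace-depth array, (3) one right-to-left sweep building a matching-close
--     table, (4) assemble the segments from the occurrence list and the table."""
--     s = inner or ""
--     n = len(s)
--     L = len(macro)
--
--     # stage 1: every position where the macro occurs
--     occ = [j for j in range(n) if s.startswith(macro, j)]
--
--     # stage 2: prefix depths D[k] = net count of unescaped braces in s[:k]
--     D = [0] * (n + 1)
--     for k in range(n):
--         ch = s[k]
--         prev = s[k - 1] if k > 0 else ""
--         if ch == "{" and prev != "\\":
--             D[k + 1] = D[k] + 1
--         elif ch == "}" and prev != "\\":
--             D[k + 1] = D[k] - 1
--         else: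
--             D[k + 1] = D[k]
--
--     # stage 3: close[p] = least k >= p with D[k+1] == D[p] - 1 (the unescaped
--     # '}' closing a group whose body starts at p), via one right-to-left sweep
--     close: List[Optional[int]] = [None] * (n + 1)
--     last = {}  # depth value -> least position k seen so far with D[k+1] == value
--     for p in range(n - 1, -1, -1):
--         last[D[p + 1]] = p
--         close[p] = last.get(D[p] - 1)
--
--     # stage 4: assemble segments
--     out: List[Tuple[str, str]] = []
--     i = 0
--     for j in occ:
--         if j < i:
--             continue
--         out.append(("math", s[i:j]))
--         p = j + L
--         k = close[p]
--         if k is None: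
--             out.append(("text", s[p:]))
--             i = n
--         else:
--             out.append(("text", s[p:k]))
--             i = k + 1
--     out.append(("math", s[i:]))
--     return out
-- ===== Notes on version B (the rewrite author's own statement) =====
-- stated objective: alternative
-- what changed: Replaces A's interleaved find-then-inner-brace-scan loop by four staged passes: a list of all macro occurrences, a prefix brace-depth array, a right-to-left sweep building a matching-close table keyed by depth value, and a final assembly walk over the occurrence list.
import Mathlib
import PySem

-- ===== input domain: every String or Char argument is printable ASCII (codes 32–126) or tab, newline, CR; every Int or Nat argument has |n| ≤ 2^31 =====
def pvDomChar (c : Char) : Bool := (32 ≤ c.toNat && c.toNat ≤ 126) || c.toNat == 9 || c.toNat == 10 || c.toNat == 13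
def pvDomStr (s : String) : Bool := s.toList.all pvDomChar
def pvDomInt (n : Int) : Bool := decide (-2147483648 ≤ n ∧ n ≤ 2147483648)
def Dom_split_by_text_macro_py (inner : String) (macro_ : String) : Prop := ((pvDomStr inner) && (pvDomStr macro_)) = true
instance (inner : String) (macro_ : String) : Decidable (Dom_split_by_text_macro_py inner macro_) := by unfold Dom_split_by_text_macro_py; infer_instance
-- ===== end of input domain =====

-- B replaces A's interleaved find-then-brace-scan loop by four staged passes (occurrence
-- list, prefix-depth array, right-to-left matching-close table, assembly walk); equivalence
-- is proved for every non-empty macro (Pre_ excludes macro_ = "", on which A's loop diverges).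


-- ===== PORT A =====
-- A's inner while loop: scan braces from k with current depth; returns the final (k, depth).
-- prev = s[k-1] if k > 0 else "" is only ever compared with '\\'; ' ' stands for Python's "".
def pvAInner (s : List Char) (k : Nat) (depth : Nat) : Nat × Nat :=
  if _h : k < s.length ∧ 0 < depth then
    let ch := s.getD k ' '
    let prev := if 0 < k then s.getD (k - 1) ' ' else ' '
    let depth' := if ch = '{' ∧ prev ≠ '\\' then depth + 1
                  else if ch = '}' ∧ prev ≠ '\\' then depth - 1
                  else depth
    pvAInner s (k + 1) depth'
  else (k, depth)
termination_by s.length - k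
decreasing_by omega

-- A's outer while-True loop.  The fuel argument only makes the recursion total in Lean:
-- whenever m ≠ [] the scan position i strictly increases and stays ≤ len(s), so the
-- initial fuel len(s)+2 is never exhausted (proved in the lemmas below); Python's loop
-- diverges exactly on m = "", which Pre_ excludes.
def pvALoop (s m : List Char) : Nat → Nat → List (String × String) → List (String × String)
  | 0, _, out => out
  | fuel + 1, i, out =>
    let j := PySem.Chars.findFrom s m (i : Int) none      -- j = s.find(macro, i)
    if j = -1 then
      out ++ [("math", String.ofList (PySem.List.slice s (some (i : Int)) none))]   -- s[i:]
    else
      let k0 := j.toNat + m.length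
      let r := pvAInner s k0 1
      let content := if r.2 = 0
        then String.ofList (PySem.List.slice s (some (k0 : Int)) (some ((r.1 - 1 : Nat) : Int)))  -- s[j+L:k-1]
        else String.ofList (PySem.List.slice s (some (k0 : Int)) none)                            -- s[j+L:]
      pvALoop s m fuel r.1
        (out ++ [("math", String.ofList (PySem.List.slice s (some (i : Int)) (some j))),          -- s[i:j]
                 ("text", content)])

def split_by_text_macro_py (inner : String) (macro_ : String) : List (String × String) :=
  pvALoop inner.toList macro_.toList (inner.toList.length + 2) 0 []

-- ===== PORT B =====
-- stage 2 of Source B: D[k+1] = D[k] ± 1 on an unescaped brace at k, else D[k]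
def pvDeltaI (s : List Char) (k : Nat) : Int :=
  let ch := s.getD k ' '
  let prev := if 0 < k then s.getD (k - 1) ' ' else ' '   -- ' ' stands for Python's ""
  if ch = '{' ∧ prev ≠ '\\' then 1
  else if ch = '}' ∧ prev ≠ '\\' then -1
  else 0

def pvDD (s : List Char) : Nat → Int
  | 0 => 0
  | k + 1 => pvDD s k + pvDeltaI s k

-- stage 3 of Source B: the right-to-left sweep, p = n-1, …, 0; builds close[0..n] by prepending
def pvBuildClose (s : List Char) : Nat → PySem.Dict Int Nat → List (Option Nat) → List (Option Nat)
  | 0, _, close => close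
  | p + 1, last, close =>
    let last' := last.insert (pvDD s (p + 1)) p          -- last[D[p+1]] = p
    pvBuildClose s p last' (last'.get? (pvDD s p - 1) :: close)   -- close[p] = last.get(D[p]-1)

-- stage 4 of Source B: the assembly walk over the occurrence list
def pvBWalk (s : List Char) (L n : Nat) (close : List (Option Nat)) :
    List Nat → Nat → List (String × String) → List (String × String)
  | [], i, out => out ++ [("math", String.ofList (PySem.List.slice s (some (i : Int)) none))]
  | j :: rest, i, out =>
    if j < i then pvBWalk s L n close rest i out
    else
      let p := j + L
      let out' := out ++ [("math", String.ofList (PySem.List.slice s (some (i : Int)) (some (j : Int))))]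
      match close.getD p none with     -- k = close[p]; p ≤ n, table length n+1
      | none => pvBWalk s L n close rest n
          (out' ++ [("text", String.ofList (PySem.List.slice s (some (p : Int)) none))])
      | some k => pvBWalk s L n close rest (k + 1)
          (out' ++ [("text", String.ofList (PySem.List.slice s (some (p : Int)) (some (k : Int))))])

def split_by_text_macro_py_alt (inner : String) (macro_ : String) : List (String × String) :=
  let s := inner.toList
  let n := s.length
  let occ := (List.range n).filter (fun j => PySem.Chars.startswith (s.drop j) macro_.toList)
  let close := pvBuildClose s n PySem.Dict.empty [none]
  pvBWalk s macro_.toList.length n close occ 0 []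

-- ===== PRECONDITION & SPEC =====
-- Pre_ excludes exactly macro_ = "": there Python A's while-True loop never terminates
-- (s.find("", i) keeps returning i), while B returns normally.
def Pre_split_by_text_macro_py (inner : String) (macro_ : String) : Prop := macro_ ≠ ""
instance (inner : String) (macro_ : String) : Decidable (Pre_split_by_text_macro_py inner macro_) := by unfold Pre_split_by_text_macro_py; infer_instance

def pvWitness_split_by_text_macro_py : String × String := ("a\\text{b}c", "\\text{")

def Spec_split_by_text_macro_py (inner : String) (macro_ : String) (out : List (String × String)) : Prop := out = split_by_text_macro_py_alt inner macro_
instance (inner : String) (macro_ : String) (out : List (String × String)) : Decidable (Spec_split_by_text_macro_py inner macro_ out) := by unfold Spec_split_by_text_macro_py; infer_instance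

-- ===== CLAIM (what is proved, stated in full; the proofs are below) =====
def Claim_equal_split_by_text_macro_py : Prop := ∀ (inner : String) (macro_ : String), Dom_split_by_text_macro_py inner macro_ → Pre_split_by_text_macro_py inner macro_ → Spec_split_by_text_macro_py inner macro_ (split_by_text_macro_py inner macro_)

-- ===== LEMMAS AND PROOFS =====

-- A's Nat brace-depth update at position k (the body of pvAInner's let)
def pvDelta (s : List Char) (k d : Nat) : Nat :=
  let ch := s.getD k ' '
  let prev := if 0 < k then s.getD (k - 1) ' ' else ' '
  if ch = '{' ∧ prev ≠ '\\' then d + 1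
  else if ch = '}' ∧ prev ≠ '\\' then d - 1
  else d

lemma pvAInner_step (s : List Char) (k d : Nat) (hk : k < s.length) (hd : 0 < d) :
    pvAInner s k d = pvAInner s (k + 1) (pvDelta s k d) := by
  rw [pvAInner, dif_pos ⟨hk, hd⟩]; rfl

lemma pvAInner_stop (s : List Char) (k d : Nat) (h : ¬ (k < s.length ∧ 0 < d)) :
    pvAInner s k d = (k, d) := by
  rw [pvAInner, dif_neg h]

lemma pvDeltaI_bounds (s : List Char) (k : Nat) : -1 ≤ pvDeltaI s k ∧ pvDeltaI s k ≤ 1 := by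
  unfold pvDeltaI
  dsimp only
  split_ifs <;> norm_num

lemma pvDelta_int (s : List Char) (k d : Nat) (hd : 0 < d) :
    ((pvDelta s k d : Nat) : Int) = (d : Int) + pvDeltaI s k := by
  unfold pvDelta pvDeltaI
  dsimp only
  split_ifs <;> omega

lemma pvDD_succ (s : List Char) (k : Nat) : pvDD s (k + 1) = pvDD s k + pvDeltaI s k := rfl

-- first k' ≥ k where the prefix depth hits pvDD s k - d is where A's inner scan stops
lemma pvAInner_find (s : List Char) :
    ∀ (cnt k d : Nat), 0 < d → k ≤ s.length → s.length - k ≤ cnt →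
    (∀ k', (List.range' k (s.length - k)).find?
        (fun k'' => decide (pvDD s (k'' + 1) = pvDD s k - (d : Int))) = some k' →
      pvAInner s k d = (k' + 1, 0)) ∧
    ((List.range' k (s.length - k)).find?
        (fun k'' => decide (pvDD s (k'' + 1) = pvDD s k - (d : Int))) = none →
      (pvAInner s k d).1 = s.length ∧ (pvAInner s k d).2 ≠ 0) := by
  intro cnt
  induction cnt with
  | zero =>
    intro k d hd hk hc
    have he : k = s.length := by omega
    subst he
    rw [pvAInner_stop s s.length d (by omega)]
    simp
    omega
  | succ cnt ih =>
    intro k d hd hk hc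
    by_cases hin : k < s.length
    · have hrw : s.length - k = (s.length - (k + 1)) + 1 := by omega
      have hdi := pvDeltaI_bounds s k
      have hdsucc : pvDD s (k + 1) = pvDD s k + pvDeltaI s k := pvDD_succ s k
      have hstep : pvAInner s k d = pvAInner s (k + 1) (pvDelta s k d) :=
        pvAInner_step s k d hin hd
      have hdint : ((pvDelta s k d : Nat) : Int) = (d : Int) + pvDeltaI s k :=
        pvDelta_int s k d hd
      by_cases hb : pvDD s (k + 1) = pvDD s k - (d : Int)
      · -- depth hits 0 exactly at k: d = 1 and the char is an unescaped '}'
        have hd1 : pvDelta s k d = 0 := by omega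
        have hstop : pvAInner s (k + 1) (pvDelta s k d) = (k + 1, 0) := by
          rw [hd1, pvAInner_stop s (k + 1) 0 (by omega)]
        refine ⟨fun k' hk' => ?_, fun hn => ?_⟩
        · rw [hrw, List.range'_succ, List.find?_cons_of_pos (by simp [hb])] at hk'
          injection hk' with hkk
          rw [← hkk, hstep, hstop]
        · rw [hrw, List.range'_succ, List.find?_cons_of_pos (by simp [hb])] at hn
          exact absurd hn (by simp)
      · have hd' : 0 < pvDelta s k d := by omega
        have hval : pvDD s (k + 1) - ((pvDelta s k d : Nat) : Int) = pvDD s k - (d : Int) := by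
          omega
        obtain ⟨ih1, ih2⟩ := ih (k + 1) (pvDelta s k d) hd' (by omega) (by omega)
        rw [hval] at ih1 ih2
        refine ⟨fun k' hk' => ?_, fun hn => ?_⟩
        · rw [hrw, List.range'_succ, List.find?_cons_of_neg (by simp [hb])] at hk'
          rw [hstep]
          exact ih1 k' hk'
        · rw [hrw, List.range'_succ, List.find?_cons_of_neg (by simp [hb])] at hn
          rw [hstep]
          exact ih2 hn
    · have he : k = s.length := by omega
      subst he
      rw [pvAInner_stop s s.length d (by omega)]
      simp
      omega

-- the dict `last` after sweeping down to p maps v to the least k ≥ p with D[k+1] = v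
def pvSpecC (s : List Char) (v : Int) (p : Nat) : Option Nat :=
  (List.range' p (s.length - p)).find? (fun k => decide (pvDD s (k + 1) = v))

lemma pvBuildClose_eq (s : List Char) :
    ∀ (p : Nat) (last : PySem.Dict Int Nat) (close : List (Option Nat)), p ≤ s.length →
    (∀ v : Int, last.get? v = pvSpecC s v p) →
    pvBuildClose s p last close
      = (List.range p).map (fun q => pvSpecC s (pvDD s q - 1) q) ++ close := by
  intro p
  induction p with
  | zero => intro last close _ _; simp [pvBuildClose]
  | succ p ih =>
    intro last close hp hInv
    have hInv' : ∀ v : Int, (last.insert (pvDD s (p + 1)) p).get? v = pvSpecC s v p := by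
      intro v
      rw [PySem.Dict.get?_insert last (pvDD s (p + 1)) v p]
      unfold pvSpecC
      have hrw : s.length - p = (s.length - (p + 1)) + 1 := by omega
      rw [hrw, List.range'_succ]
      by_cases hv : v = pvDD s (p + 1)
      · rw [if_pos hv, List.find?_cons_of_pos (by simp [hv])]
      · rw [if_neg hv, List.find?_cons_of_neg (by simp; exact fun h => hv h.symm)]
        rw [hInv v]
        rfl
    rw [pvBuildClose]
    rw [ih (last.insert (pvDD s (p + 1)) p) _ (by omega) hInv']
    rw [hInv' (pvDD s p - 1)]
    rw [List.range_succ, List.map_append]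
    simp

lemma pvCloseTab_getD (s : List Char) (p : Nat) (hp : p ≤ s.length) :
    (pvBuildClose s s.length PySem.Dict.empty [none]).getD p none
      = pvSpecC s (pvDD s p - 1) p := by
  have hbc := pvBuildClose_eq s s.length PySem.Dict.empty [none] le_rfl
    (fun v => by rw [PySem.Dict.get?_empty v]; unfold pvSpecC; simp)
  rw [hbc]
  rcases Nat.lt_or_ge p s.length with hlt | hge
  · rw [List.getD_eq_getElem?_getD, List.getElem?_append_left (by simpa using hlt)]
    simp [hlt]
  · have hpe : p = s.length := by omega
    subst hpe
    rw [List.getD_eq_getElem?_getD, List.getElem?_append_right (by simp)]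
    simp
    unfold pvSpecC
    simp

lemma pvCloseTab_sound (s : List Char) (p k : Nat)
    (h : (pvBuildClose s s.length PySem.Dict.empty [none]).getD p none = some k) :
    p ≤ k ∧ k < s.length := by
  rcases Nat.lt_or_ge s.length p with hgt | hle
  · rw [List.getD_eq_getElem?_getD, List.getElem?_eq_none (by
      rw [pvBuildClose_eq s s.length PySem.Dict.empty [none] le_rfl
        (fun v => by rw [PySem.Dict.get?_empty v]; unfold pvSpecC; simp)]
      simp; omega)] at h
    simp at h
  · rw [pvCloseTab_getD s p hle] at h
    have hmem := List.mem_of_find?_eq_some h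
    have := (List.mem_range'_1).1 hmem
    omega

-- find(m, i) = i when m matches at i
lemma pv_ff_self {s m : List Char} {i : Nat} (hi : i ≤ s.length) (hp : m <+: s.drop i) :
    PySem.Chars.findFrom s m (i : Int) none = (i : Int) := by
  by_cases h : PySem.Chars.findFrom s m (i : Int) none = -1
  · exact absurd ((PySem.Chars.findFrom_natCast_eq_neg_one_iff s m i hi).1 h)
      (fun hn => hn hp.isInfix)
  · obtain ⟨h1, h2, h3⟩ := PySem.Chars.findFrom_natCast_spec s m i hi h
    by_cases hlt : i < (PySem.Chars.findFrom s m (i : Int) none).toNat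
    · exact absurd hp (h3 i le_rfl hlt)
    · omega

-- find(m, i) = find(m, i+1) when m does not match at i < len(s)
lemma pv_ff_step {s m : List Char} {i : Nat} (_hm : m ≠ []) (hi : i < s.length)
    (hp : ¬ m <+: s.drop i) :
    PySem.Chars.findFrom s m (i : Int) none = PySem.Chars.findFrom s m ((i + 1 : Nat) : Int) none := by
  have hi1 : i + 1 ≤ s.length := hi
  by_cases h : PySem.Chars.findFrom s m (i : Int) none = -1
  · rw [h]; symm
    rw [PySem.Chars.findFrom_natCast_eq_neg_one_iff s m (i + 1) hi1]
    intro hinf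
    refine (PySem.Chars.findFrom_natCast_eq_neg_one_iff s m i (by omega)).1 h (hinf.trans ?_)
    have hdd : s.drop (i + 1) = (s.drop i).drop 1 := by rw [List.drop_drop]
    rw [hdd]
    exact (List.drop_suffix 1 (s.drop i)).isInfix
  · obtain ⟨h1, h2, h3⟩ := PySem.Chars.findFrom_natCast_spec s m i (by omega) h
    have hai : (PySem.Chars.findFrom s m (i : Int) none).toNat ≠ i := fun he => hp (he ▸ h2)
    have h4 : PySem.Chars.findFrom s m ((i + 1 : Nat) : Int) none ≠ -1 := by
      rw [Ne, PySem.Chars.findFrom_natCast_eq_neg_one_iff s m (i + 1) hi1]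
      intro hn
      refine hn (h2.isInfix.trans ?_)
      have hdd : s.drop (PySem.Chars.findFrom s m (i : Int) none).toNat
          = (s.drop (i+1)).drop ((PySem.Chars.findFrom s m (i : Int) none).toNat - (i+1)) := by
        rw [List.drop_drop]; congr 1; omega
      rw [hdd]
      exact (List.drop_suffix _ (s.drop (i+1))).isInfix
    obtain ⟨h5, h6, h7⟩ := PySem.Chars.findFrom_natCast_spec s m (i + 1) hi1 h4
    have hab : ¬ (PySem.Chars.findFrom s m (i : Int) none).toNat <
        (PySem.Chars.findFrom s m ((i + 1 : Nat) : Int) none).toNat :=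
      fun hlt => h7 (PySem.Chars.findFrom s m (i : Int) none).toNat (by omega) hlt h2
    have hba : ¬ (PySem.Chars.findFrom s m ((i + 1 : Nat) : Int) none).toNat <
        (PySem.Chars.findFrom s m (i : Int) none).toNat :=
      fun hlt => h3 (PySem.Chars.findFrom s m ((i + 1 : Nat) : Int) none).toNat (by omega) hlt h6
    omega

-- find(m, len(s)) = -1 for nonempty m
lemma pv_ff_end {s m : List Char} (hm : m ≠ []) :
    PySem.Chars.findFrom s m ((s.length : Nat) : Int) none = -1 := by
  rw [PySem.Chars.findFrom_natCast_eq_neg_one_iff s m s.length le_rfl]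
  intro hinf
  have h1 : m.length ≤ (s.drop s.length).length := hinf.length_le
  have h2 : (s.drop s.length).length = s.length - s.length := List.length_drop
  have h3 : 0 < m.length := List.length_pos_iff.2 hm
  omega

lemma pv_prefix_bound {s m : List Char} {t : Nat} (hm : m ≠ []) (h : m <+: s.drop t) :
    t + m.length ≤ s.length := by
  have h1 : m.length ≤ (s.drop t).length := h.length_le
  have h2 : (s.drop t).length = s.length - t := List.length_drop
  have h3 : 0 < m.length := List.length_pos_iff.2 hm
  omega

-- dropping the occurrences < k from the tail of the occurrence list re-bases it at k
lemma pvG_split (s m : List Char) (a k : Nat) (hak : a ≤ k) (hk : k ≤ s.length) :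
    ((List.range' a (s.length - a)).filter
        (fun j => PySem.Chars.startswith (s.drop j) m)).filter (fun j => decide (k ≤ j))
      = (List.range' k (s.length - k)).filter (fun j => PySem.Chars.startswith (s.drop j) m) := by
  have hsplit : List.range' a (s.length - a)
      = List.range' a (k - a) ++ List.range' k (s.length - k) := by
    have h := @List.range'_append a (k - a) (s.length - k) 1
    rw [show a + 1 * (k - a) = k by omega] at h
    rw [show (k - a) + (s.length - k) = s.length - a by omega] at h
    exact h.symm
  rw [hsplit, List.filter_append, List.filter_append]
  have h1 : ((List.range' a (k - a)).filter
      (fun j => PySem.Chars.startswith (s.drop j) m)).filter (fun j => decide (k ≤ j)) = [] := by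
    apply List.filter_eq_nil_iff.2
    intro x hx
    simp only [decide_eq_true_iff]
    have := (List.mem_range'_1).1 (List.mem_of_mem_filter hx)
    omega
  have h2 : ((List.range' k (s.length - k)).filter
      (fun j => PySem.Chars.startswith (s.drop j) m)).filter (fun j => decide (k ≤ j))
      = (List.range' k (s.length - k)).filter (fun j => PySem.Chars.startswith (s.drop j) m) := by
    apply List.filter_eq_self.2
    intro x hx
    simp only [decide_eq_true_iff]
    exact ((List.mem_range'_1).1 (List.mem_of_mem_filter hx)).1
  rw [h1, h2, List.nil_append]

-- head characterisation of the occurrence-list suffix via s.find(macro, i)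
lemma pvG_char (s m : List Char) (hm : m ≠ []) :
    ∀ (cnt i : Nat), i ≤ s.length → s.length - i ≤ cnt →
    (PySem.Chars.findFrom s m (i : Int) none = -1 →
      (List.range' i (s.length - i)).filter (fun j => PySem.Chars.startswith (s.drop j) m) = []) ∧
    (∀ j : Nat, PySem.Chars.findFrom s m (i : Int) none = (j : Int) →
      (List.range' i (s.length - i)).filter (fun j => PySem.Chars.startswith (s.drop j) m)
        = j :: (List.range' (j + 1) (s.length - (j + 1))).filter
            (fun j => PySem.Chars.startswith (s.drop j) m)) := by
  intro cnt
  induction cnt with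
  | zero =>
    intro i hi hc
    have he : i = s.length := by omega
    subst he
    refine ⟨fun _ => by simp, fun j hj => ?_⟩
    rw [pv_ff_end hm] at hj
    exact absurd hj (by omega)
  | succ cnt ih =>
    intro i hi hc
    by_cases hin : i < s.length
    · have hrw : s.length - i = (s.length - (i + 1)) + 1 := by omega
      by_cases hq : PySem.Chars.startswith (s.drop i) m
      · have hpre : m <+: s.drop i := (PySem.Chars.startswith_iff _ _).1 hq
        have hff := pv_ff_self (le_of_lt hin) hpre
        refine ⟨fun h => absurd (hff ▸ h) (by omega), fun j hj => ?_⟩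
        rw [hff] at hj
        have hji : j = i := by omega
        subst hji
        rw [hrw, List.range'_succ, List.filter_cons_of_pos (p := fun j => PySem.Chars.startswith (s.drop j) m) (by simpa using hq)]
      · have hpre : ¬ m <+: s.drop i := fun hp => hq ((PySem.Chars.startswith_iff _ _).2 hp)
        have hff := pv_ff_step hm hin hpre
        have hfe : (List.range' i (s.length - i)).filter
              (fun j => PySem.Chars.startswith (s.drop j) m)
            = (List.range' (i + 1) (s.length - (i + 1))).filter
              (fun j => PySem.Chars.startswith (s.drop j) m) := by
          rw [hrw, List.range'_succ, List.filter_cons_of_neg (p := fun j => PySem.Chars.startswith (s.drop j) m) (by simpa using hq)]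
        obtain ⟨ihc1, ihc2⟩ := ih (i + 1) (by omega) (by omega)
        refine ⟨fun h => ?_, fun j hj => ?_⟩
        · rw [hfe]; exact ihc1 (hff ▸ h)
        · rw [hfe]; exact ihc2 j (hff ▸ hj)
    · have he : i = s.length := by omega
      subst he
      refine ⟨fun _ => by simp, fun j hj => ?_⟩
      rw [pv_ff_end hm] at hj
      exact absurd hj (by omega)

-- B's walk skips exactly the occurrences below the current position
lemma pvBWalk_filter (s : List Char) (L n : Nat) (C : List (Option Nat))
    (hC : ∀ p k, C.getD p none = some k → p ≤ k ∧ k < n) :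
    ∀ (sz : Nat) (l : List Nat), l.length ≤ sz → ∀ (i : Nat) (out : List (String × String)),
      i ≤ n →
      pvBWalk s L n C l i out = pvBWalk s L n C (l.filter (fun j => decide (i ≤ j))) i out := by
  intro sz
  induction sz with
  | zero =>
    intro l hl i out _
    have : l = [] := List.length_eq_zero_iff.1 (by omega)
    subst this
    simp
  | succ sz ih =>
    intro l hl i out hi
    match l with
    | [] => simp
    | j :: rest =>
      by_cases hji : j < i
      · rw [List.filter_cons_of_neg (by simp; omega)]
        rw [pvBWalk, if_pos hji]
        exact ih rest (by simp at hl; omega) i out hi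
      · rw [List.filter_cons_of_pos (by simp; omega)]
        rw [pvBWalk, pvBWalk, if_neg hji, if_neg hji]
        have hrl : rest.length ≤ sz := by simp at hl; omega
        have hfl : (rest.filter (fun j => decide (i ≤ j))).length ≤ sz :=
          le_trans (List.length_filter_le _ _) hrl
        cases hc : C.getD (j + L) none with
        | none =>
          simp only [hc]
          rw [ih rest hrl n _ le_rfl, ih _ hfl n _ le_rfl]
          have hff : (rest.filter (fun j => decide (i ≤ j))).filter (fun j => decide (n ≤ j))
              = rest.filter (fun j => decide (n ≤ j)) := by
            rw [List.filter_filter]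
            exact List.filter_congr (fun x _ => by
              by_cases h1 : n ≤ x <;> by_cases h2 : i ≤ x <;> simp [h1, h2] <;> omega)
          rw [hff]
        | some k =>
          obtain ⟨hk1, hk2⟩ := hC (j + L) k hc
          have hik : i ≤ k + 1 := by omega
          simp only [hc]
          rw [ih rest hrl (k + 1) _ (by omega), ih _ hfl (k + 1) _ (by omega)]
          have hff : (rest.filter (fun j => decide (i ≤ j))).filter (fun j => decide (k + 1 ≤ j))
              = rest.filter (fun j => decide (k + 1 ≤ j)) := by
            rw [List.filter_filter]
            exact List.filter_congr (fun x _ => by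
              by_cases h1 : k + 1 ≤ x <;> by_cases h2 : i ≤ x <;> simp [h1, h2] <;> omega)
          rw [hff]

-- one unfolding of A's outer loop when the macro is found at j
lemma pvALoop_succ_hit (s m : List Char) (fuel i j : Nat) (out : List (String × String))
    (hff : PySem.Chars.findFrom s m (i : Int) none = ((j : Nat) : Int)) :
    pvALoop s m (fuel + 1) i out =
      pvALoop s m fuel (pvAInner s (j + m.length) 1).1
        (out ++ [("math", String.ofList (PySem.List.slice s (some (i : Int)) (some ((j : Nat) : Int)))),
                 ("text", if (pvAInner s (j + m.length) 1).2 = 0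
                   then String.ofList (PySem.List.slice s (some ((j + m.length : Nat) : Int))
                          (some (((pvAInner s (j + m.length) 1).1 - 1 : Nat) : Int)))
                   else String.ofList (PySem.List.slice s (some ((j + m.length : Nat) : Int)) none))]) := by
  simp only [pvALoop, hff]
  rw [if_neg (by omega)]
  simp only [Int.toNat_natCast]

-- main correspondence: A's outer loop from i equals B's walk over the occurrences ≥ i
lemma pv_main (s m : List Char) (hm : m ≠ []) :
    ∀ (fuel i : Nat) (out : List (String × String)), i ≤ s.length → s.length + 1 ≤ fuel + i →
    pvALoop s m fuel i out
      = pvBWalk s m.length s.length (pvBuildClose s s.length PySem.Dict.empty [none])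
          ((List.range' i (s.length - i)).filter (fun j => PySem.Chars.startswith (s.drop j) m))
          i out := by
  have hL : 0 < m.length := List.length_pos_iff.2 hm
  have hCs : ∀ p k, (pvBuildClose s s.length PySem.Dict.empty [none]).getD p none = some k →
      p ≤ k ∧ k < s.length := pvCloseTab_sound s
  intro fuel
  induction fuel with
  | zero => intro i out hi hf; exact absurd hf (by omega)
  | succ fuel ih =>
    intro i out hi hf
    obtain ⟨hG1, hG2⟩ := pvG_char s m hm (s.length - i) i hi le_rfl
    by_cases hff : PySem.Chars.findFrom s m (i : Int) none = -1
    · simp only [pvALoop]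
      rw [if_pos hff, hG1 hff, pvBWalk]
    · obtain ⟨h1, h2, h3⟩ := PySem.Chars.findFrom_natCast_spec s m i hi hff
      obtain ⟨j, hFj⟩ : ∃ j : Nat, PySem.Chars.findFrom s m (i : Int) none = (j : Int) :=
        ⟨(PySem.Chars.findFrom s m (i : Int) none).toNat, by omega⟩
      rw [hFj] at h1 h2
      simp only [Int.toNat_natCast] at h2
      have hij : i ≤ j := by omega
      have hpn : j + m.length ≤ s.length := pv_prefix_bound hm h2
      rw [pvALoop_succ_hit s m fuel i j out hFj]
      obtain ⟨hf1, hf2⟩ := pvAInner_find s (s.length - (j + m.length)) (j + m.length) 1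
        one_pos hpn le_rfl
      rw [hG2 j hFj, pvBWalk, if_neg (show ¬ j < i by omega)]
      simp only [pvCloseTab_getD s (j + m.length) hpn]
      cases hc : pvSpecC s (pvDD s (j + m.length) - 1) (j + m.length) with
      | some k0 =>
        have hck0 : (List.range' (j + m.length) (s.length - (j + m.length))).find?
            (fun k'' => decide (pvDD s (k'' + 1) = pvDD s (j + m.length) - ((1 : Nat) : Int)))
            = some k0 := by
          unfold pvSpecC at hc
          simpa [Nat.cast_one] using hc
        have hA := hf1 k0 hck0
        have hk0mem := (List.mem_range'_1).1 (List.mem_of_find?_eq_some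
          (by unfold pvSpecC at hc; exact hc))
        rw [hA]
        simp only []
        rw [if_true]
        have hsub : (k0 + 1 - 1 : Nat) = k0 := by omega
        rw [hsub]
        rw [ih (k0 + 1) _ (by omega) (by omega)]
        rw [pvBWalk_filter s m.length s.length _ hCs
          ((List.range' (j + 1) (s.length - (j + 1))).filter (fun j => PySem.Chars.startswith (s.drop j) m)).length
          _ le_rfl (k0 + 1) _ (by omega)]
        rw [pvG_split s m (j + 1) (k0 + 1) (by omega) (by omega)]
        simp
      | none =>
        have hcn : (List.range' (j + m.length) (s.length - (j + m.length))).find?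
            (fun k'' => decide (pvDD s (k'' + 1) = pvDD s (j + m.length) - ((1 : Nat) : Int)))
            = none := by
          unfold pvSpecC at hc
          simpa [Nat.cast_one] using hc
        obtain ⟨hA1, hA2⟩ := hf2 hcn
        rw [if_neg hA2, hA1]
        obtain ⟨f', rfl⟩ : ∃ f', fuel = f' + 1 := ⟨fuel - 1, by omega⟩
        simp only [pvALoop]
        rw [if_pos (pv_ff_end hm)]
        rw [pvBWalk_filter s m.length s.length _ hCs
          ((List.range' (j + 1) (s.length - (j + 1))).filter (fun j => PySem.Chars.startswith (s.drop j) m)).length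
          _ le_rfl s.length _ le_rfl]
        rw [pvG_split s m (j + 1) s.length (by omega) le_rfl]
        simp only [Nat.sub_self, List.range'_zero, List.filter_nil, pvBWalk]
        simp

lemma pv_toList_ne (macro_ : String) (h : macro_ ≠ "") : macro_.toList ≠ [] := by
  intro hc
  have h2 := congrArg String.ofList hc
  simp at h2
  exact h h2

-- ===== VERDICT (by name: the statement is the Claim_ definition above) =====
theorem split_by_text_macro_py_spec : Claim_equal_split_by_text_macro_py := by
  unfold Claim_equal_split_by_text_macro_py
  intro inner macro_ _hdom hpre
  unfold Spec_split_by_text_macro_py split_by_text_macro_py split_by_text_macro_py_alt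
  dsimp only
  have h0 : List.range inner.toList.length = List.range' 0 (inner.toList.length - 0) := by
    rw [List.range_eq_range']; norm_num
  rw [h0]
  exact pv_main inner.toList macro_.toList (pv_toList_ne macro_ hpre)
    (inner.toList.length + 2) 0 [] (by omega) (by omega)
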